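-- pv_equiv track=rewrite | github.com/aorursy/new-nb-5 | one1111_m5-analysis-by-departments-and-stores-eda.py | replace_duplicate
-- ===== SOURCE A (Python) =====
-- def replace_duplicate(index_with_dup):
--
--     index = []
--
--     for i in index_with_dup:
--
--         if i not in index:
--
--             index.append(i)
--
--         else:
--
--             while i in index:
--
--                 i-=1
--
--             index.append(i)
--
--     return index
-- ===== SOURCE B (Python) =====
-- def replace_duplicate(index_with_dup):
--     parent = {}
--     out = []
--     for i in index_with_dup:
--         path = []
--         x = i
--         while x in parent:
--             path.append(x)
--             x = parent[x]
--         for y in path: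
--             parent[y] = x
--         out.append(x)
--         parent[x] = x - 1
--     return out
-- ===== Notes on version B (the rewrite author's own statement) =====
-- stated objective: faster
-- what changed: Replaced the linear membership-list with inner decrement-by-one scan by a union-find 'next free slot' forest: a parent dict whose chains (with path compression) jump straight to the largest free value <= i, eliminating both the O(n) list membership test and the step-by-step downward scan.
import Mathlib
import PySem

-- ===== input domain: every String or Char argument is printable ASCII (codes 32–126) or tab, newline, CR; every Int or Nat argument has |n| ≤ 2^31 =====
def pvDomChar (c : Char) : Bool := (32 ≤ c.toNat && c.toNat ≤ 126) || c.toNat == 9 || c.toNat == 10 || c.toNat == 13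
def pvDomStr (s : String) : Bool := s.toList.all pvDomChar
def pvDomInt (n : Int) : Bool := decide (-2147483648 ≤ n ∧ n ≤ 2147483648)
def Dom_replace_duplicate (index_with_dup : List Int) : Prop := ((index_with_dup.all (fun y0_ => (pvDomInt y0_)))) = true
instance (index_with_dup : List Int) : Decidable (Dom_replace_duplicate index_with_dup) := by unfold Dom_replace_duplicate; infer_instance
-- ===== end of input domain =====

-- B replaces A's list-membership decrement scan by a path-compressed union-find "next free slot" forest (faster).


-- ===== PORT A =====
-- A's inner `while i in index: i -= 1`; the fuel only makes it total and is
-- always sufficient (see scanDown_correct below).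
def scanDown (index : List Int) (i : Int) : Nat → Int
  | 0 => i
  | fuel+1 => if i ∈ index then scanDown index (i - 1) fuel else i

def replace_duplicate (index_with_dup : List Int) : List Int :=
  index_with_dup.foldl
    (fun index i =>
      if i ∉ index then index ++ [i]
      else index ++ [scanDown index (i - 1) index.length])
    []

-- ===== PORT B =====
-- B's `while x in parent: path.append(x); x = parent[x]`; fuel only for totality.
def findRoot (parent : PySem.Dict Int Int) : Int → Nat → List Int → Int × List Int
  | x, 0, path => (x, path)
  | x, fuel+1, path =>
    match parent.get? x with
    | none => (x, path)
    | some p => findRoot parent p fuel (path ++ [x])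

def bStep (st : PySem.Dict Int Int × List Int) (i : Int) : PySem.Dict Int Int × List Int :=
  let r := findRoot st.1 i (st.1.size + 1) []
  let parent1 := r.2.foldl (fun d y => d.insert y r.1) st.1
  (parent1.insert r.1 (r.1 - 1), st.2 ++ [r.1])

def replace_duplicate_alt (index_with_dup : List Int) : List Int :=
  (index_with_dup.foldl bStep (PySem.Dict.empty, [])).2

-- ===== PRECONDITION & SPEC =====
def Spec_replace_duplicate (index_with_dup : List Int) (out : List Int) : Prop := out = replace_duplicate_alt index_with_dup
instance (index_with_dup : List Int) (out : List Int) : Decidable (Spec_replace_duplicate index_with_dup out) := by unfold Spec_replace_duplicate; infer_instance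

-- ===== CLAIM (what is proved, stated in full; the proofs are below) =====
def Claim_equal_replace_duplicate : Prop := ∀ (index_with_dup : List Int), Dom_replace_duplicate index_with_dup → Spec_replace_duplicate index_with_dup (replace_duplicate index_with_dup)

-- ===== LEMMAS AND PROOFS =====

-- the union-find invariant relating B's parent dict to A's occupied-slot list S
def UFInv (parent : PySem.Dict Int Int) (S : List Int) : Prop :=
  parent.keys.Nodup ∧
  (∀ x : Int, (parent.get? x).isSome = true ↔ x ∈ S) ∧
  (∀ x p : Int, parent.get? x = some p →
     p < x ∧ ∀ y : Int, p < y → y ≤ x → y ∈ S)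

-- scanDown finds the first free value when the fuel covers the distance
lemma scanDown_correct (S : List Int) :
    ∀ (k : Nat) (x : Int) (fuel : Nat),
      (∀ j : Nat, j < k → (x - (j : Int)) ∈ S) → (x - (k : Int)) ∉ S → k ≤ fuel →
      scanDown S x fuel = x - (k : Int) := by
  intro k
  induction k with
  | zero =>
    intro x fuel _ hfree _
    simp only [Int.natCast_zero, Int.sub_zero] at hfree ⊢
    cases fuel with
    | zero => rfl
    | succ f => simp [scanDown, hfree]
  | succ k ih =>
    intro x fuel hmem hfree hle
    cases fuel with
    | zero => omega
    | succ f =>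
      have hx : x ∈ S := by
        have := hmem 0 (by omega); simpa using this
      simp only [scanDown, hx, if_true]
      have h1 : scanDown S (x - 1) f = (x - 1) - (k : Int) := by
        apply ih
        · intro j hj
          have := hmem (j + 1) (by omega)
          have he : x - ((j + 1 : Nat) : Int) = x - 1 - (j : Int) := by push_cast; ring
          rwa [he] at this
        · have he : x - ((k + 1 : Nat) : Int) = x - 1 - (k : Int) := by push_cast; ring
          rwa [he] at hfree
        · omega
      rw [h1]; push_cast; ring

-- pigeonhole: k consecutive occupied values force k ≤ S.length
lemma occupied_le_length (S : List Int) (x : Int) (k : Nat)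
    (hmem : ∀ j : Nat, j < k → (x - (j : Int)) ∈ S) : k ≤ S.length := by
  have hinj : Function.Injective (fun j : Nat => x - (j : Int)) := by
    intro a b hab
    have : x - (a : Int) = x - (b : Int) := hab
    omega
  have hnd : ((List.range k).map (fun (j : Nat) => x - (j : Int))).Nodup :=
    List.nodup_range.map hinj
  have hsub : ((List.range k).map (fun (j : Nat) => x - (j : Int))) ⊆ S := by
    intro y hy
    rcases List.mem_map.mp hy with ⟨j, hj, rfl⟩
    exact hmem j (List.mem_range.mp hj)
  have := (List.subperm_of_subset hnd hsub).length_le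
  simpa using this

lemma free_exists (S : List Int) (x : Int) : ∃ k : Nat, (x - (k : Int)) ∉ S := by
  by_contra h
  have hall : ∀ k : Nat, (x - (k : Int)) ∈ S := by
    intro k
    by_contra hk
    exact h ⟨k, hk⟩
  have := occupied_le_length S x (S.length + 1) (fun (j : Nat) _ => hall j)
  omega

-- the distance from x down to the first free slot
def freeDist (S : List Int) (x : Int) : Nat := Nat.find (free_exists S x)

lemma freeDist_free (S : List Int) (x : Int) : (x - (freeDist S x : Int)) ∉ S :=
  Nat.find_spec (free_exists S x)

lemma freeDist_mem (S : List Int) (x : Int) :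
    ∀ j : Nat, j < freeDist S x → (x - (j : Int)) ∈ S := by
  intro j hj
  have := Nat.find_min (free_exists S x) hj
  simpa using this

-- every value in the half-open interval (x - freeDist, x] is occupied
lemma mem_of_between (S : List Int) (x : Int) (y : Int)
    (h1 : x - (freeDist S x : Int) < y) (h2 : y ≤ x) : y ∈ S := by
  have hj : ((x - y).toNat : Int) = x - y := by omega
  have := freeDist_mem S x (x - y).toNat (by omega)
  rwa [hj, show x - (x - y) = y by ring] at this

-- lookup after the compression loop: every y in the path now maps to v
lemma get?_foldl_insert_const (q : List Int) (v : Int) :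
    ∀ (d : PySem.Dict Int Int) (x : Int),
      (q.foldl (fun d y => d.insert y v) d).get? x =
        if x ∈ q then some v else d.get? x := by
  induction q with
  | nil => intro d x; simp
  | cons y q ih =>
    intro d x
    simp only [List.foldl_cons, ih, PySem.Dict.get?_insert, List.mem_cons]
    by_cases hq : x ∈ q
    · simp [hq]
    · by_cases hxy : x = y
      · simp [hxy]
      · simp [hq, hxy]

lemma keys_nodup_foldl_insert_const (q : List Int) (v : Int) (d : PySem.Dict Int Int)
    (h : d.keys.Nodup) : (q.foldl (fun d y => d.insert y v) d).keys.Nodup :=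
  PySem.Dict.nodup_keys_foldl_insert q (fun _ _ => v) d h

-- findRoot follows the forest down to the first free slot; the path it
-- collects lies strictly between the root and the start
lemma findRoot_spec :
    ∀ (fuel k : Nat) (parent : PySem.Dict Int Int) (S : List Int) (i : Int) (path : List Int),
      UFInv parent S →
      (∀ j : Nat, j < k → (i - (j : Int)) ∈ S) → (i - (k : Int)) ∉ S → k < fuel →
      ∃ q : List Int,
        findRoot parent i fuel path = (i - (k : Int), path ++ q) ∧
        ∀ y ∈ q, i - (k : Int) < y ∧ y ≤ i := by
  intro fuel
  induction fuel with
  | zero => intro k _ _ _ _ _ _ _ h; omega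
  | succ f ih =>
    intro k parent S i path hinv hmem hfree hk
    obtain ⟨hnd, hdom, hstruct⟩ := hinv
    cases k with
    | zero =>
      have hni : i ∉ S := by simpa using hfree
      have : parent.get? i = none := by
        cases hg : parent.get? i with
        | none => rfl
        | some p => exact absurd ((hdom i).mp (by simp [hg])) hni
      refine ⟨[], ?_, by simp⟩
      simp [findRoot, this]
    | succ k' =>
      have hi : i ∈ S := by have := hmem 0 (by omega); simpa using this
      have hsome : (parent.get? i).isSome = true := (hdom i).mpr hi
      cases hg : parent.get? i with
      | none => rw [hg] at hsome; simp at hsome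
      | some p =>
        obtain ⟨hpi, hbetween⟩ := hstruct i p hg
        set r : Int := i - ((k' + 1 : Nat) : Int) with hr
        have hrk : r = i - (k' + 1) := by rw [hr]; push_cast; ring
        have hrp : r ≤ p := by
          by_contra hc
          exact hfree (hbetween r (by omega) (by omega))
        -- distance from p to the free slot
        have hmem' : ∀ j : Nat, j < (p - r).toNat → (p - (j : Int)) ∈ S := by
          intro j hj
          have hj' : (j : Int) < p - r := by omega
          -- p - j lies in (r, i] hence is occupied
          have h1 : r < p - (j : Int) := by omega
          have h2 : p - (j : Int) ≤ i := by omega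
          -- use the original interval fact: every y ∈ (i - (k'+1), i] is in S
          have : ((i - (p - (j : Int))).toNat : Int) = i - (p - (j : Int)) := by omega
          have hm := hmem (i - (p - (j : Int))).toNat (by omega)
          rwa [this, show i - (i - (p - (j:Int))) = p - (j:Int) by ring] at hm
        have hfree' : (p - (((p - r).toNat : Nat) : Int)) ∉ S := by
          have : (((p - r).toNat : Nat) : Int) = p - r := by omega
          rw [this, show p - (p - r) = r by ring, hr]
          exact hfree
        have hklt : (p - r).toNat < f := by omega
        obtain ⟨q', hq'eq, hq'prop⟩ :=
          ih (p - r).toNat parent S p (path ++ [i]) ⟨hnd, hdom, hstruct⟩ hmem' hfree' hklt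
        refine ⟨i :: q', ?_, ?_⟩
        · simp only [findRoot, hg]
          rw [hq'eq]
          have hc1 : p - (((p - r).toNat : Nat) : Int) = i - ((k' + 1 : Nat) : Int) := by
            push_cast
            omega
          rw [hc1]
          simp
          omega
        · intro y hy
          rcases List.mem_cons.mp hy with rfl | hy'
          · exact ⟨by omega, by omega⟩
          · obtain ⟨h1, h2⟩ := hq'prop y hy'
            constructor
            · omega
            · omega

-- one B step: emits the first free slot and preserves the invariant
lemma bStep_spec (parent : PySem.Dict Int Int) (S out : List Int) (i : Int)
    (hinv : UFInv parent S) :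
    bStep (parent, out) i =
      ((bStep (parent, out) i).1, out ++ [i - (freeDist S i : Int)]) ∧
    UFInv (bStep (parent, out) i).1 (S ++ [i - (freeDist S i : Int)]) := by
  obtain ⟨hnd, hdom, hstruct⟩ := hinv
  set k := freeDist S i with hkdef
  set r : Int := i - (k : Int) with hrdef
  -- fuel is sufficient: k ≤ parent.size
  have hkeysS : ∀ x : Int, x ∈ parent.keys ↔ x ∈ S := by
    intro x
    rw [← hdom x]
    cases hg : parent.get? x with
    | none =>
      rw [PySem.Dict.get?_eq_none_iff_not_mem_keys] at hg
      simp [hg]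
    | some p =>
      have hk' : x ∈ parent.keys := by
        by_contra hc
        rw [← PySem.Dict.get?_eq_none_iff_not_mem_keys] at hc
        rw [hc] at hg
        cases hg
      simp [hk']
  have hsize : k ≤ parent.size := by
    have h1 : k ≤ parent.keys.length := by
      have hinj : Function.Injective (fun j : Nat => i - (j : Int)) := by
        intro a b hab
        have : i - (a : Int) = i - (b : Int) := hab
        omega
      have hnd' : ((List.range k).map (fun (j : Nat) => i - (j : Int))).Nodup :=
        List.nodup_range.map hinj
      have hsub : ((List.range k).map (fun (j : Nat) => i - (j : Int))) ⊆ parent.keys := by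
        intro y hy
        rcases List.mem_map.mp hy with ⟨j, hj, rfl⟩
        exact (hkeysS _).mpr (freeDist_mem S i j (List.mem_range.mp hj))
      have := (List.subperm_of_subset hnd' hsub).length_le
      simpa using this
    have h2 : parent.keys.length = parent.size := by
      simp [PySem.Dict.keys, PySem.Dict.size]
    omega
  obtain ⟨q, hfr, hq⟩ :=
    findRoot_spec (parent.size + 1) k parent S i [] ⟨hnd, hdom, hstruct⟩
      (freeDist_mem S i) (freeDist_free S i) (by omega)
  have hrS : r ∉ S := freeDist_free S i
  have hqS : ∀ y ∈ q, y ∈ S := by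
    intro y hy
    obtain ⟨h1, h2⟩ := hq y hy
    exact mem_of_between S i y h1 h2
  -- unfold bStep with the computed findRoot result
  have hbs : bStep (parent, out) i =
      ((q.foldl (fun d y => d.insert y r) parent).insert r (r - 1), out ++ [r]) := by
    simp only [bStep, hfr]
    rfl
  set parent1 := q.foldl (fun d y => d.insert y r) parent with hp1
  have hget1 : ∀ x : Int, parent1.get? x = if x ∈ q then some r else parent.get? x :=
    fun x => get?_foldl_insert_const q r parent x
  refine ⟨by rw [hbs], ?_⟩
  rw [hbs]
  refine ⟨?_, ?_, ?_⟩
  · -- keys nodup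
    exact PySem.Dict.nodup_keys_insert _ _ _
      (keys_nodup_foldl_insert_const q r parent hnd)
  · -- domain
    intro x
    rw [PySem.Dict.get?_insert]
    by_cases hxr : x = r
    · simp [hxr]
    · simp only [hxr, if_false, hget1]
      by_cases hxq : x ∈ q
      · simp only [hxq, if_true]
        constructor
        · intro _; exact List.mem_append_left _ (hqS x hxq)
        · intro _; rfl
      · simp only [hxq, if_false]
        rw [hdom x]
        constructor
        · intro h; exact List.mem_append_left _ h
        · intro h
          rcases List.mem_append.mp h with h | h
          · exact h
          · simp at h; exact absurd h hxr
  · -- structure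
    intro x p hxp
    rw [PySem.Dict.get?_insert] at hxp
    by_cases hxr : x = r
    · rw [hxr]
      simp only [hxr, if_true] at hxp
      injection hxp with hp
      refine ⟨by omega, ?_⟩
      intro y h1 h2
      have : y = r := by omega
      rw [this]
      exact List.mem_append_right _ (by simp)
    · simp only [hxr, if_false, hget1] at hxp
      by_cases hxq : x ∈ q
      · simp only [hxq, if_true] at hxp
        injection hxp with hp
        obtain ⟨h1, h2⟩ := hq x hxq
        refine ⟨by omega, ?_⟩
        intro y hy1 hy2
        exact List.mem_append_left _ (mem_of_between S i y (by omega) (by omega))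
      · simp only [hxq, if_false] at hxp
        obtain ⟨h1, h2⟩ := hstruct x p hxp
        exact ⟨h1, fun y hy1 hy2 => List.mem_append_left _ (h2 y hy1 hy2)⟩

-- one A step emits the same first free slot
lemma aStep_value (S : List Int) (i : Int) :
    (if i ∉ S then S ++ [i] else S ++ [scanDown S (i - 1) S.length]) =
      S ++ [i - (freeDist S i : Int)] := by
  by_cases hi : i ∈ S
  · have hk : 1 ≤ freeDist S i := by
      by_contra hc
      have h0 : freeDist S i = 0 := by omega
      have := freeDist_free S i
      rw [h0] at this
      simp at this
      exact this hi
    simp only [hi, not_true, if_false]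
    have hlen : freeDist S i ≤ S.length := occupied_le_length S i _ (freeDist_mem S i)
    have hs : scanDown S (i - 1) S.length = (i - 1) - ((freeDist S i - 1 : Nat) : Int) := by
      apply scanDown_correct
      · intro j hj
        have := freeDist_mem S i (j + 1) (by omega)
        rwa [show i - ((j + 1 : Nat) : Int) = i - 1 - (j : Int) by push_cast; ring] at this
      · have := freeDist_free S i
        rwa [show i - ((freeDist S i : Nat) : Int) = i - 1 - ((freeDist S i - 1 : Nat) : Int) by omega] at this
      · omega
    rw [hs]
    congr 2
    omega
  · have hk : freeDist S i = 0 := by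
      have h0 : (i - ((0 : Nat) : Int)) ∉ S := by simpa using hi
      unfold freeDist
      exact (Nat.find_eq_zero _).mpr h0
    simp [hi, hk]

-- main induction over the input list
lemma main_loop :
    ∀ (l : List Int) (parent : PySem.Dict Int Int) (S : List Int),
      UFInv parent S →
      l.foldl (fun index i =>
          if i ∉ index then index ++ [i]
          else index ++ [scanDown index (i - 1) index.length]) S =
        (l.foldl bStep (parent, S)).2 := by
  intro l
  induction l with
  | nil => intro parent S _; rfl
  | cons i l ih =>
    intro parent S hinv
    obtain ⟨hfst, hinv'⟩ := bStep_spec parent S S i hinv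
    simp only [List.foldl_cons]
    rw [aStep_value S i, hfst]
    exact ih _ _ hinv'

lemma Inv_empty : UFInv PySem.Dict.empty [] := by
  refine ⟨by simp, by simp [PySem.Dict.get?_empty], ?_⟩
  intro x p h
  simp [PySem.Dict.get?_empty] at h

-- ===== VERDICT (by name: the statement is the Claim_ definition above) =====
theorem replace_duplicate_spec : Claim_equal_replace_duplicate := by
  intro l _
  unfold Spec_replace_duplicate replace_duplicate replace_duplicate_alt
  exact main_loop l PySem.Dict.empty [] Inv_empty
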